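-- pv_equiv track=rewrite | github.com/Diallo/Repated-SStuBs-Analysis | data_preparation/data_grouping.py | exclude_buckets_with_single_sstubs
-- ===== SOURCE A (Python) =====
-- import copy
--
-- def exclude_buckets_with_single_sstubs(grouped_sstubs):
--     filtered_projects_sstubs = copy.deepcopy(grouped_sstubs)
--     for project_name, buckets in grouped_sstubs.items():
--
--         # remove buckets that contain only 1 sstub
--         for bucket_id, sstubs_of_bucket in buckets.items():
--             is_single_sstub_in_bucket = len(sstubs_of_bucket) == 1
--             if is_single_sstub_in_bucket:
--                 filtered_projects_sstubs[project_name].pop(bucket_id)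
--
--         # remove projects that don't contain any buckets anymore
--         if filtered_projects_sstubs[project_name] == {}:
--             filtered_projects_sstubs.pop(project_name)
--
--     return filtered_projects_sstubs
-- ===== SOURCE B (Python) =====
-- def exclude_buckets_with_single_sstubs(grouped_sstubs):
--     result = {}
--     for project, buckets in grouped_sstubs.items():
--         kept = {bucket_id: list(sstubs) for bucket_id, sstubs in buckets.items()
--                 if len(sstubs) != 1}
--         if kept:
--             result[project] = kept
--     return result
-- ===== Notes on version B (the rewrite author's own statement) =====
-- stated objective: simpler
-- what changed: B builds the filtered nested dict fresh in one pass (keep buckets with len != 1, include a project only if something is kept) instead of deepcopying the whole input and then popping buckets and projects out of the copy while iterating the original.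
import Mathlib
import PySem

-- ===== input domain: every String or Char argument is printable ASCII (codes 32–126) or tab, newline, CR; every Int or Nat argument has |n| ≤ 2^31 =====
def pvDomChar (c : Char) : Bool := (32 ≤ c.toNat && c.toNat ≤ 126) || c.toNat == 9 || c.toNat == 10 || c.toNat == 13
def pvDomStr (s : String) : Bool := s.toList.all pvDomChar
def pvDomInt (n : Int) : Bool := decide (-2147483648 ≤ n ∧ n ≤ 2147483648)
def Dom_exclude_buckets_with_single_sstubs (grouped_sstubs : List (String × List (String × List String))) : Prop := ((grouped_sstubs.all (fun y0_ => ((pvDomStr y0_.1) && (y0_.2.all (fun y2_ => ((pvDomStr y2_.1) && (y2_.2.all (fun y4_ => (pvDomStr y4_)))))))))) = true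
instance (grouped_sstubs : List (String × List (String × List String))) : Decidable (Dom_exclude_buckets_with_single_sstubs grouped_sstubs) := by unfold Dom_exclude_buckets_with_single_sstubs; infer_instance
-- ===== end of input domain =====

-- B rebuilds the filtered nested dict in one constructive pass instead of A's
-- deepcopy-then-pop mutation of the copy; objective: simpler.

-- ===== PORT A =====
-- assoc-list models of Python dict mutation (first-match key, as in a dup-free dict):
-- d.pop(k)
def pvPop {α : Type} (d : List (String × α)) (k : String) : List (String × α) :=
  match d with
  | [] => []
  | (k', v) :: rest => if k' = k then rest else (k', v) :: pvPop rest k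

-- d[k] = f(d[k]) (in-place mutation of the value stored at k)
def pvModifyAt {α : Type} (d : List (String × α)) (k : String) (f : α → α) : List (String × α) :=
  match d with
  | [] => []
  | (k', v) :: rest => if k' = k then (k', f v) :: rest else (k', v) :: pvModifyAt rest k f

-- d[k] read (the key is always present when A reads it, given unique keys — Pre_)
def pvLookupD {α : Type} (d : List (String × α)) (k : String) (dflt : α) : α :=
  match d with
  | [] => dflt
  | (k', v) :: rest => if k' = k then v else pvLookupD rest k dflt

-- body of A's outer loop: pop single-sstub buckets out of the copy, then the project if empty
def pvProjectStepA (filtered : List (String × List (String × List String)))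
    (pb : String × List (String × List String)) : List (String × List (String × List String)) :=
  let filtered2 := pb.2.foldl
    (fun f b => if b.2.length = 1 then pvModifyAt f pb.1 (fun inner => pvPop inner b.1) else f)
    filtered
  if pvLookupD filtered2 pb.1 [] = [] then pvPop filtered2 pb.1 else filtered2

def exclude_buckets_with_single_sstubs (grouped_sstubs : List (String × List (String × List String))) : List (String × List (String × List String)) :=
  grouped_sstubs.foldl pvProjectStepA grouped_sstubs  -- deepcopy = the list itself as start state

-- ===== PORT B =====
-- the inner comprehension of Source B: buckets kept because they do not hold exactly one sstub
def pvKept (bs : List (String × List String)) : List (String × List String) :=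
  bs.filter (fun b => b.2.length ≠ 1)

def exclude_buckets_with_single_sstubs_alt (grouped_sstubs : List (String × List (String × List String))) : List (String × List (String × List String)) :=
  grouped_sstubs.foldl
    (fun res pb =>
      let kept := pvKept pb.2
      if kept.isEmpty then res else res ++ [(pb.1, kept)])
    []

-- ===== PRECONDITION & SPEC =====
-- Pre_ excludes association lists with duplicate outer or inner keys: those do not
-- represent Python dicts (dict keys are unique), so A's behaviour there is not defined.
def Pre_exclude_buckets_with_single_sstubs (grouped_sstubs : List (String × List (String × List String))) : Prop :=
  (grouped_sstubs.map (·.1)).Nodup ∧ ∀ pb ∈ grouped_sstubs, (pb.2.map (·.1)).Nodup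
instance (grouped_sstubs : List (String × List (String × List String))) : Decidable (Pre_exclude_buckets_with_single_sstubs grouped_sstubs) := by unfold Pre_exclude_buckets_with_single_sstubs; infer_instance

def pvWitness_exclude_buckets_with_single_sstubs : (List (String × List (String × List String))) :=
  [("p", [("b", ["s1", "s2"]), ("c", ["x"])]), ("q", [("d", [])])]

def Spec_exclude_buckets_with_single_sstubs (grouped_sstubs : List (String × List (String × List String))) (out : List (String × List (String × List String))) : Prop := out = exclude_buckets_with_single_sstubs_alt grouped_sstubs
instance (grouped_sstubs : List (String × List (String × List String))) (out : List (String × List (String × List String))) : Decidable (Spec_exclude_buckets_with_single_sstubs grouped_sstubs out) := by unfold Spec_exclude_buckets_with_single_sstubs; infer_instance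

-- ===== CLAIM (what is proved, stated in full; the proofs are below) =====
def Claim_equal_exclude_buckets_with_single_sstubs : Prop := ∀ (grouped_sstubs : List (String × List (String × List String))), Dom_exclude_buckets_with_single_sstubs grouped_sstubs → Pre_exclude_buckets_with_single_sstubs grouped_sstubs → Spec_exclude_buckets_with_single_sstubs grouped_sstubs (exclude_buckets_with_single_sstubs grouped_sstubs)

-- ===== LEMMAS AND PROOFS =====

-- the per-project filter B computes, as a filterMap step
def pvFm (pb : String × List (String × List String)) : Option (String × List (String × List String)) :=
  if (pvKept pb.2).isEmpty then none else some (pb.1, pvKept pb.2)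

theorem alt_eq_filterMap_aux (gs : List (String × List (String × List String)))
    (acc : List (String × List (String × List String))) :
    gs.foldl
      (fun res pb =>
        let kept := pvKept pb.2
        if kept.isEmpty then res else res ++ [(pb.1, kept)])
      acc = acc ++ gs.filterMap pvFm := by
  induction gs generalizing acc with
  | nil => simp
  | cons e rest ih =>
    rw [List.foldl_cons, List.filterMap_cons]
    by_cases h : (pvKept e.2).isEmpty
    · have hfm : pvFm e = none := by simp [pvFm, h]
      rw [hfm]
      simp only [h, if_true]
      exact ih acc
    · have hfm : pvFm e = some (e.1, pvKept e.2) := by simp [pvFm, h]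
      rw [hfm]
      simp only [h, Bool.false_eq_true, if_false]
      rw [ih (acc ++ [(e.1, pvKept e.2)])]
      simp

theorem pvModifyAt_id {α : Type} (d : List (String × α)) (k : String) :
    pvModifyAt d k (fun x => x) = d := by
  induction d with
  | nil => rfl
  | cons e rest ih =>
    obtain ⟨k', v⟩ := e
    simp only [pvModifyAt]
    split <;> simp [ih]

theorem pvModifyAt_comp {α : Type} (d : List (String × α)) (k : String) (f g : α → α) :
    pvModifyAt (pvModifyAt d k f) k g = pvModifyAt d k (fun x => g (f x)) := by
  induction d with
  | nil => rfl
  | cons e rest ih =>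
    obtain ⟨k', v⟩ := e
    simp only [pvModifyAt]
    split <;> simp [pvModifyAt, *]

-- the inner fold of A is one modification of the entry at p
theorem fold_modify (p : String) (bs : List (String × List String))
    (d : List (String × List (String × List String))) :
    bs.foldl (fun f b => if b.2.length = 1 then pvModifyAt f p (fun inner => pvPop inner b.1) else f) d
      = pvModifyAt d p (fun cur =>
          bs.foldl (fun cur b => if b.2.length = 1 then pvPop cur b.1 else cur) cur) := by
  induction bs generalizing d with
  | nil => exact (pvModifyAt_id d p).symm
  | cons b rest ih =>
    simp only [List.foldl_cons]
    by_cases h : b.2.length = 1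
    · rw [if_pos h, ih, pvModifyAt_comp]
      have : ∀ cur : List (String × List String),
          (if b.2.length = 1 then pvPop cur b.1 else cur) = pvPop cur b.1 := fun cur => if_pos h
      simp only [this]
    · rw [if_neg h, ih]
      have : ∀ cur : List (String × List String),
          (if b.2.length = 1 then pvPop cur b.1 else cur) = cur := fun cur => if_neg h
      simp only [this]

theorem pvModifyAt_middle {α : Type} (pre rest : List (String × α)) (p : String) (v : α) (f : α → α)
    (h : p ∉ pre.map (·.1)) :
    pvModifyAt (pre ++ (p, v) :: rest) p f = pre ++ (p, f v) :: rest := by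
  induction pre with
  | nil => simp [pvModifyAt]
  | cons e pre' ih =>
    obtain ⟨k', v'⟩ := e
    simp only [List.map_cons, List.mem_cons, not_or] at h
    simp only [List.cons_append, pvModifyAt, if_neg (fun hh : k' = p => h.1 hh.symm)]
    simp [ih h.2]

theorem pvLookupD_middle {α : Type} (pre rest : List (String × α)) (p : String) (v : α) (dflt : α)
    (h : p ∉ pre.map (·.1)) :
    pvLookupD (pre ++ (p, v) :: rest) p dflt = v := by
  induction pre with
  | nil => simp [pvLookupD]
  | cons e pre' ih =>
    obtain ⟨k', v'⟩ := e
    simp only [List.map_cons, List.mem_cons, not_or] at h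
    simp only [List.cons_append, pvLookupD, if_neg (fun hh : k' = p => h.1 hh.symm)]
    exact ih h.2

theorem pvPop_middle {α : Type} (pre rest : List (String × α)) (p : String) (v : α)
    (h : p ∉ pre.map (·.1)) :
    pvPop (pre ++ (p, v) :: rest) p = pre ++ rest := by
  induction pre with
  | nil => simp [pvPop]
  | cons e pre' ih =>
    obtain ⟨k', v'⟩ := e
    simp only [List.map_cons, List.mem_cons, not_or] at h
    simp only [List.cons_append, pvPop, if_neg (fun hh : k' = p => h.1 hh.symm)]
    simp [ih h.2]

-- popping each single-sstub bucket of bs out of (pre ++ bs) leaves pre ++ the kept buckets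
theorem inner_pops (bs pre : List (String × List String))
    (hdisj : ∀ b ∈ bs, b.1 ∉ pre.map (·.1)) (hnd : (bs.map (·.1)).Nodup) :
    bs.foldl (fun cur b => if b.2.length = 1 then pvPop cur b.1 else cur) (pre ++ bs)
      = pre ++ pvKept bs := by
  induction bs generalizing pre with
  | nil => simp [pvKept]
  | cons b rest ih =>
    simp only [List.map_cons, List.nodup_cons] at hnd
    simp only [List.foldl_cons]
    by_cases h : b.2.length = 1
    · have hb : b.1 ∉ pre.map (·.1) := hdisj b (List.mem_cons_self)
      have hpop : pvPop (pre ++ b :: rest) b.1 = pre ++ rest := by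
        obtain ⟨bk, bv⟩ := b; exact pvPop_middle pre rest bk bv hb
      rw [if_pos h, hpop, ih pre (fun e he => hdisj e (List.mem_cons_of_mem _ he)) hnd.2]
      simp [pvKept, h]
    · rw [if_neg h]
      have hstate : pre ++ b :: rest = (pre ++ [b]) ++ rest := by simp
      rw [hstate, ih (pre ++ [b]) ?_ hnd.2]
      · simp [pvKept, h]
      · intro e he
        simp only [List.map_append, List.mem_append, List.map_cons, List.map_nil,
          List.mem_cons, List.not_mem_nil, or_false, not_or]
        refine ⟨hdisj e (List.mem_cons_of_mem _ he), ?_⟩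
        intro hmem
        exact hnd.1 (hmem ▸ List.mem_map_of_mem he)

-- main invariant of A's outer loop
theorem outer_loop (gs pre : List (String × List (String × List String)))
    (hdisj : ∀ e ∈ gs, e.1 ∉ pre.map (·.1)) (hnd : (gs.map (·.1)).Nodup)
    (hinner : ∀ e ∈ gs, (e.2.map (·.1)).Nodup) :
    gs.foldl pvProjectStepA (pre ++ gs) = pre ++ gs.filterMap pvFm := by
  induction gs generalizing pre with
  | nil => simp
  | cons e rest ih =>
    obtain ⟨p, buckets⟩ := e
    simp only [List.map_cons, List.nodup_cons] at hnd
    have hp : p ∉ pre.map (·.1) := hdisj (p, buckets) (List.mem_cons_self)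
    have hstep : pvProjectStepA (pre ++ (p, buckets) :: rest) (p, buckets)
        = if pvKept buckets = [] then pre ++ rest
          else pre ++ (p, pvKept buckets) :: rest := by
      simp only [pvProjectStepA, fold_modify]
      rw [pvModifyAt_middle pre rest p buckets _ hp]
      have hin : buckets.foldl (fun cur b => if b.2.length = 1 then pvPop cur b.1 else cur) buckets
          = pvKept buckets := by
        have := inner_pops buckets [] (by simp) (hinner (p, buckets) (List.mem_cons_self))
        simpa using this
      rw [hin, pvLookupD_middle pre rest p _ _ hp]
      split
      · exact pvPop_middle pre rest p _ hp
      · rfl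
    rw [List.foldl_cons, hstep, List.filterMap_cons]
    by_cases hk : pvKept buckets = []
    · have hfm : pvFm (p, buckets) = none := by simp [pvFm, hk]
      rw [if_pos hk, hfm]
      exact ih pre (fun e' he' => hdisj e' (List.mem_cons_of_mem _ he'))
        hnd.2 (fun e' he' => hinner e' (List.mem_cons_of_mem _ he'))
    · have hfm : pvFm (p, buckets) = some (p, pvKept buckets) := by
        simp [pvFm, List.isEmpty_iff, hk]
      rw [if_neg hk, hfm]
      have hstate : pre ++ (p, pvKept buckets) :: rest
          = (pre ++ [(p, pvKept buckets)]) ++ rest := by simp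
      rw [hstate, ih (pre ++ [(p, pvKept buckets)]) ?_ hnd.2
        (fun e' he' => hinner e' (List.mem_cons_of_mem _ he'))]
      · simp
      · intro e' he'
        simp only [List.map_append, List.mem_append, List.map_cons, List.map_nil,
          List.mem_cons, List.not_mem_nil, or_false, not_or]
        refine ⟨hdisj e' (List.mem_cons_of_mem _ he'), ?_⟩
        intro hmem
        exact hnd.1 (hmem ▸ List.mem_map_of_mem he')

-- ===== VERDICT (by name: the statement is the Claim_ definition above) =====
theorem exclude_buckets_with_single_sstubs_spec : Claim_equal_exclude_buckets_with_single_sstubs := by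
  intro g _ hpre
  unfold Spec_exclude_buckets_with_single_sstubs
  unfold exclude_buckets_with_single_sstubs exclude_buckets_with_single_sstubs_alt
  rw [alt_eq_filterMap_aux]
  have := outer_loop g [] (by simp) hpre.1 hpre.2
  simpa using this
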